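-- pv_equiv track=rewrite | github.com/samheadleand/Calc | Calc2.py | find_next_operator_in_sum
-- ===== SOURCE A (Python) =====
-- def first_number_split_string_up(s):
--     a = ''
--     for c in s:
--         if ord(c) in range (48,58):
--             a = a + c
--         else:
--             return a
--     return a
--
-- def find_next_operator_in_sum(s):
--     op = ''
--     operators = {42,43,45,47}
--     for c in s[len(first_number_split_string_up(s)):]:
--         if ord(c) in operators:
--             op = op + c
--         else:
--             return op
-- ===== SOURCE B (Python) =====
-- def find_next_operator_in_sum(s):
--     op = ''
--     in_ops = False
--     for c in s:
--         o = ord(c)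
--         if not in_ops:
--             if 48 <= o <= 57:
--                 continue
--             in_ops = True
--         if o in (42, 43, 45, 47):
--             op = op + c
--         else:
--             return op
--     return None
-- ===== Notes on version B (the rewrite author's own statement) =====
-- stated objective: simpler
-- what changed: Replaces A's two sequential passes (a helper that re-collects the leading digits plus a second loop over a slice) by a single one-pass state machine with an in_ops flag and no helper.
import Mathlib
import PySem

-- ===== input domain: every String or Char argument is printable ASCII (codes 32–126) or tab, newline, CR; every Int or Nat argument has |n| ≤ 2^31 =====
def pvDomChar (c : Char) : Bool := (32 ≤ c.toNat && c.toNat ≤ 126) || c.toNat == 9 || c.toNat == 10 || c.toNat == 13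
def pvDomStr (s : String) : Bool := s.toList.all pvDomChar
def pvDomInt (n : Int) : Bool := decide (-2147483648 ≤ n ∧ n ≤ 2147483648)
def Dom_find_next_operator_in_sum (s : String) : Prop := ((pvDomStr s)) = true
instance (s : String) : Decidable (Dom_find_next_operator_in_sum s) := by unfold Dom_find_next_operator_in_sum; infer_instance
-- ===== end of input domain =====

-- B replaces A's two sequential passes (digit-collecting helper + loop over a slice) by a
-- single one-pass state machine with an in_ops flag; same O(n) cost, simpler shape.

-- ===== PORT A =====
-- first_number_split_string_up: accumulate leading chars with ord in range(48,58), stop at first other char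
def pvA_firstNum : List Char → List Char → List Char
  | a, [] => a
  | a, c :: rest => if 48 ≤ c.toNat ∧ c.toNat < 58 then pvA_firstNum (a ++ [c]) rest else a

-- the main loop of A over s[len(first_number_split_string_up(s)):]; falling off the loop = Python's implicit None
def pvA_opLoop : List Char → List Char → Option (List Char)
  | _, [] => none
  | op, c :: rest => if c.toNat ∈ ([42, 43, 45, 47] : List Nat) then pvA_opLoop (op ++ [c]) rest else some op

def find_next_operator_in_sum (s : String) : Option String :=
  (pvA_opLoop []
      (PySem.List.slice s.toList (some ((pvA_firstNum [] s.toList).length : Int)) none)).map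
    (fun l => String.mk l)

-- ===== PORT B =====
-- one pass: while not in_ops skip digits; from the first non-digit on, collect operator chars,
-- return op at the first non-operator char, none if the string ends first
def pvB_loop : Bool → List Char → List Char → Option (List Char)
  | _, _, [] => none
  | inOps, op, c :: rest =>
    if !inOps ∧ (48 ≤ c.toNat ∧ c.toNat ≤ 57) then pvB_loop inOps op rest
    else if c.toNat = 42 ∨ c.toNat = 43 ∨ c.toNat = 45 ∨ c.toNat = 47 then
      pvB_loop true (op ++ [c]) rest
    else some op

def find_next_operator_in_sum_alt (s : String) : Option String :=
  (pvB_loop false [] s.toList).map (fun l => String.mk l)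

-- ===== PRECONDITION & SPEC =====
def Spec_find_next_operator_in_sum (s : String) (out : Option String) : Prop := out = find_next_operator_in_sum_alt s
instance (s : String) (out : Option String) : Decidable (Spec_find_next_operator_in_sum s out) := by unfold Spec_find_next_operator_in_sum; infer_instance

-- ===== CLAIM (what is proved, stated in full; the proofs are below) =====
def Claim_equal_find_next_operator_in_sum : Prop := ∀ (s : String), Dom_find_next_operator_in_sum s → Spec_find_next_operator_in_sum s (find_next_operator_in_sum s)

-- ===== LEMMAS AND PROOFS =====

-- the accumulator of A's helper is only prepended
theorem pvA_firstNum_acc (l acc : List Char) :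
    pvA_firstNum acc l = acc ++ pvA_firstNum [] l := by
  induction l generalizing acc with
  | nil => simp [pvA_firstNum]
  | cons c rest ih =>
      by_cases h : 48 ≤ c.toNat ∧ c.toNat < 58
      · rw [pvA_firstNum, pvA_firstNum, if_pos h, if_pos h]
        simp only [List.nil_append]
        rw [ih (acc ++ [c]), ih [c]]
        simp
      · simp [pvA_firstNum, h]

-- once in the operator phase, B's loop is A's operator loop
theorem pvB_loop_true (l op : List Char) : pvB_loop true op l = pvA_opLoop op l := by
  induction l generalizing op with
  | nil => rfl
  | cons c rest ih =>
      by_cases h : c.toNat = 42 ∨ c.toNat = 43 ∨ c.toNat = 45 ∨ c.toNat = 47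
      · simp [pvB_loop, pvA_opLoop, h, ih]
      · simp only [pvB_loop, pvA_opLoop]
        rw [if_neg (by simp), if_neg h, if_neg (by simpa using h)]

-- main: A's slice-then-scan equals B's one-pass machine, over char lists
theorem pv_main (l : List Char) :
    pvA_opLoop [] (l.drop (pvA_firstNum [] l).length) = pvB_loop false [] l := by
  induction l with
  | nil => rfl
  | cons c rest ih =>
      by_cases h : 48 ≤ c.toNat ∧ c.toNat < 58
      · rw [pvA_firstNum, if_pos h]
        simp only [List.nil_append]
        rw [pvA_firstNum_acc rest [c]]
        simpa [pvB_loop, h, Nat.lt_succ_iff.mp h.2] using ih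
      · rw [pvA_firstNum, if_neg h]
        simp only [List.length_nil, List.drop_zero]
        by_cases hop : c.toNat = 42 ∨ c.toNat = 43 ∨ c.toNat = 45 ∨ c.toNat = 47
        · simp only [pvA_opLoop, pvB_loop]
          rw [if_pos (by simpa using hop), if_neg (by simpa [Nat.lt_succ_iff] using h),
            if_pos hop, pvB_loop_true]
        · simp only [pvA_opLoop, pvB_loop]
          rw [if_neg (by simpa using hop), if_neg (by simpa [Nat.lt_succ_iff] using h),
            if_neg hop]

-- ===== VERDICT (by name: the statement is the Claim_ definition above) =====
theorem find_next_operator_in_sum_spec : Claim_equal_find_next_operator_in_sum := by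
  intro s _
  unfold Spec_find_next_operator_in_sum find_next_operator_in_sum find_next_operator_in_sum_alt
  rw [PySem.List.slice_from_natCast, pv_main]
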